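-- pv_equiv track=rewrite | github.com/holosiek/holUJ-Bot | main.py | dajBB
-- ===== SOURCE A (Python) =====
-- def dajBB(msg):
--     temp = msg.split("```")
--     strin = ""
--     bb = []
--     for i in range(0, len(temp), 2):
--         ttemp = temp[i].split("**")
--         for j in range(1, len(ttemp), 2):
--             bb.append(ttemp[j].strip())
--         strin += temp[i] + " "
--     return [strin, bb]
-- ===== SOURCE B (Python) =====
-- def dajBB(msg):
--     # Single linear scan with in_code / in_bold flags instead of nested split passes.
--     strin_parts = []   # chunks of the returned text (non-code segments, each ended by ' ')
--     bb = []
--     in_code = False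
--     in_bold = False
--     seg = []           # chars of the current non-code segment (markers included)
--     run = []           # chars of the current bold run
--     i = 0
--     n = len(msg)
--     while i < n:
--         if msg.startswith("```", i):
--             if not in_code:
--                 strin_parts.append("".join(seg))
--                 strin_parts.append(" ")
--                 if in_bold:
--                     bb.append("".join(run).strip())
--                 seg = []
--                 run = []
--                 in_bold = False
--             in_code = not in_code
--             i += 3
--         elif not in_code and msg.startswith("**", i):
--             seg.append("**")
--             in_bold = not in_bold
--             if not in_bold:
--                 bb.append("".join(run).strip())
--                 run = []
--             i += 2
--         else:
--             if not in_code: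
--                 seg.append(msg[i])
--                 if in_bold:
--                     run.append(msg[i])
--             i += 1
--     if not in_code:
--         strin_parts.append("".join(seg))
--         strin_parts.append(" ")
--         if in_bold:
--             bb.append("".join(run).strip())
--     return ["".join(strin_parts), bb]
-- ===== Notes on version B (the rewrite author's own statement) =====
-- stated objective: alternative
-- what changed: Replaces A's triple-backtick split with even-index selection plus a nested double-asterisk split per segment by a single left-to-right character scan that keeps in_code and in_bold flags and accumulates the current segment and bold run incrementally.
import Mathlib
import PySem

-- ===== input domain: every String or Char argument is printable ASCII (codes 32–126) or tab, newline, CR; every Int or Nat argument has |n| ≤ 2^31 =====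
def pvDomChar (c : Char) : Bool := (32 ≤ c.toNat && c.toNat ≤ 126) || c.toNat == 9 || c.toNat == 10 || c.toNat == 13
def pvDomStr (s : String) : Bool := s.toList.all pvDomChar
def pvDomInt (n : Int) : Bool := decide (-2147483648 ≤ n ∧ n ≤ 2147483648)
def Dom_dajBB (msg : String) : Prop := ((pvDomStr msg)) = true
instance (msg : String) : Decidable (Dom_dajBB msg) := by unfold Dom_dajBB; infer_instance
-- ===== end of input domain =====

-- B replaces A's nested split("```")/split("**") passes with a single left-to-right
-- character scan keeping in_code/in_bold flags (objective: alternative decomposition).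

-- ===== PORT A =====
-- literal port of A: split on "```", loop i over range(0, len, 2), inner split on "**",
-- loop j over range(1, len, 2) collecting stripped pieces; strings handled on .toList
-- (PySem.Chars) and wrapped with String.mk at the end.
def dajBB (msg : String) : String × List String :=
  let temp := PySem.Chars.splitOn msg.toList ['`', '`', '`']
  let res :=
    (PySem.List.pyRange 0 (temp.length : Int) 2).foldl
      (fun (st : List Char × List (List Char)) i =>
        let t := PySem.List.pyGetD temp i []
        let ttemp := PySem.Chars.splitOn t ['*', '*']
        let bb :=
          (PySem.List.pyRange 1 (ttemp.length : Int) 2).foldl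
            (fun bb j => bb ++ [PySem.Chars.strip (PySem.List.pyGetD ttemp j [])]) st.2
        (st.1 ++ t ++ [' '], bb))
      ([], [])
  (String.mk res.1, res.2.map String.mk)

-- ===== PORT B =====
-- literal port of B's while-loop over msg: the index i / startswith tests become
-- pattern matches on the remaining character list; the scan state (in_code, in_bold,
-- seg, run, strin, bb) is carried unchanged (Source B's char lists joined at the end are
-- the List Char accumulators here).
def scanB (cs : List Char) (inCode inBold : Bool) (seg run strin : List Char)
    (bb : List (List Char)) : List Char × List (List Char) :=
  match cs with
  | '`' :: '`' :: '`' :: rest =>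
      if inCode then
        scanB rest false inBold seg run strin bb
      else
        scanB rest true false [] []
          (strin ++ seg ++ [' '])
          (if inBold then bb ++ [PySem.Chars.strip run] else bb)
  | '*' :: '*' :: rest =>
      if inCode then
        -- else-branch of the Python loop: consume one character, nothing recorded
        scanB ('*' :: rest) true inBold seg run strin bb
      else
        if inBold then
          scanB rest false false (seg ++ ['*', '*']) [] strin
            (bb ++ [PySem.Chars.strip run])
        else
          scanB rest false true (seg ++ ['*', '*']) run strin bb
  | c :: rest =>
      if inCode then
        scanB rest true inBold seg run strin bb
      else
        scanB rest false inBold (seg ++ [c]) (if inBold then run ++ [c] else run) strin bb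
  | [] =>
      if inCode then (strin, bb)
      else (strin ++ seg ++ [' '], if inBold then bb ++ [PySem.Chars.strip run] else bb)
termination_by cs.length
decreasing_by all_goals (simp; try omega)

def dajBB_alt (msg : String) : String × List String :=
  let res := scanB msg.toList false false [] [] [] []
  (String.mk res.1, res.2.map String.mk)

-- ===== PRECONDITION & SPEC =====
def Spec_dajBB (msg : String) (out : String × List String) : Prop := out = dajBB_alt msg
instance (msg : String) (out : String × List String) : Decidable (Spec_dajBB msg out) := by
  unfold Spec_dajBB; infer_instance

-- ===== CLAIM (what is proved, stated in full; the proofs are below) =====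
def Claim_equal_dajBB : Prop := ∀ (msg : String), Dom_dajBB msg → Spec_dajBB msg (dajBB msg)

-- ===== LEMMAS AND PROOFS =====

-- head of the greedy split of cs on "```" (text before the first "```")
def hd3 : List Char → List Char
  | '`' :: '`' :: '`' :: _ => []
  | c :: rest => c :: hd3 rest
  | [] => []

-- remaining pieces of the greedy split of cs on "```"
def tl3 : List Char → List (List Char)
  | '`' :: '`' :: '`' :: rest => hd3 rest :: tl3 rest
  | _ :: rest => tl3 rest
  | [] => []

def hd2 : List Char → List Char
  | '*' :: '*' :: _ => []
  | c :: rest => c :: hd2 rest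
  | [] => []

def tl2 : List Char → List (List Char)
  | '*' :: '*' :: rest => hd2 rest :: tl2 rest
  | _ :: rest => tl2 rest
  | [] => []

-- every other piece, stripped: pick true takes the head, pick false skips it
def pick : Bool → List (List Char) → List (List Char)
  | _, [] => []
  | false, _ :: ps => pick true ps
  | true, p :: ps => PySem.Chars.strip p :: pick false ps

-- what A computes from the segment list (head = even segment, skip one, recurse)
def procT : List (List Char) → List Char × List (List Char)
  | [] => ([], [])
  | a :: l =>
      ((a ++ [' ']) ++ (procT l.tail).1, pick true (tl2 a) ++ (procT l.tail).2)
termination_by l => l.length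
decreasing_by simp

-- B's bold-extraction scan restricted to a single segment
def innerScan : Bool → List Char → List Char → List (List Char)
  | b, run, '*' :: '*' :: rest =>
      if b then PySem.Chars.strip run :: innerScan false [] rest
      else innerScan true [] rest
  | b, run, c :: rest => innerScan b (if b then run ++ [c] else run) rest
  | b, run, [] => if b then [PySem.Chars.strip run] else []
termination_by _ _ t => t.length
decreasing_by all_goals simp

theorem procT_cons (a : List Char) (l : List (List Char)) :
    procT (a :: l) = ((a ++ [' ']) ++ (procT l.tail).1, pick true (tl2 a) ++ (procT l.tail).2) := by
  rw [procT]

theorem hd3_cons (c : Char) (rest : List Char)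
    (h1 : ∀ tail, c = '`' → rest = '`' :: '`' :: tail → False) :
    hd3 (c :: rest) = c :: hd3 rest := by
  rw [hd3.eq_def]
  split
  · rename_i heq; injection heq with h2 h3; exact (h1 _ h2 h3).elim
  · rename_i x y heq; injection heq with e1 e2; rw [e1, e2]
  · rename_i heq; cases heq

theorem tl3_cons (c : Char) (rest : List Char)
    (h1 : ∀ tail, c = '`' → rest = '`' :: '`' :: tail → False) :
    tl3 (c :: rest) = tl3 rest := by
  rw [tl3.eq_def]
  split
  · rename_i heq; injection heq with h2 h3; exact (h1 _ h2 h3).elim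
  · rename_i x y heq; injection heq with e1 e2; rw [e2]
  · rename_i heq; cases heq

theorem hd3_bt (rest : List Char) : hd3 ('`' :: '`' :: '`' :: rest) = [] := rfl

theorem tl3_bt (rest : List Char) : tl3 ('`' :: '`' :: '`' :: rest) = hd3 rest :: tl3 rest := rfl

theorem hd3_cons_inv (rest : List Char) (c' : Char) (t : List Char)
    (h : hd3 rest = c' :: t) : ∃ u, rest = c' :: u := by
  match rest with
  | [] => cases h
  | a :: r =>
    by_cases hsh : ∃ tail, a = '`' ∧ r = '`' :: '`' :: tail
    · obtain ⟨tail, rfl, rfl⟩ := hsh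
      rw [hd3_bt] at h; cases h
    · rw [hd3_cons a r (fun tail e1 e2 => hsh ⟨tail, e1, e2⟩)] at h
      injection h with e1 _
      exact ⟨r, by rw [e1]⟩

theorem prefix3_false (c : Char) (rest : List Char)
    (h1 : ∀ tail, c = '`' → rest = '`' :: '`' :: tail → False) :
    List.isPrefixOf ['`','`','`'] (c :: rest) = false := by
  rcases rest with _ | ⟨a, _ | ⟨b, r⟩⟩ <;> simp [List.isPrefixOf]
  intro hc ha hb
  exact h1 r hc.symm (by rw [← ha, ← hb])

theorem hd2_cons (c : Char) (rest : List Char)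
    (h1 : ∀ tail, c = '*' → rest = '*' :: tail → False) :
    hd2 (c :: rest) = c :: hd2 rest := by
  rw [hd2.eq_def]
  split
  · rename_i heq; injection heq with h2 h3; exact (h1 _ h2 h3).elim
  · rename_i x y heq; injection heq with e1 e2; rw [e1, e2]
  · rename_i heq; cases heq

theorem tl2_cons (c : Char) (rest : List Char)
    (h1 : ∀ tail, c = '*' → rest = '*' :: tail → False) :
    tl2 (c :: rest) = tl2 rest := by
  rw [tl2.eq_def]
  split
  · rename_i heq; injection heq with h2 h3; exact (h1 _ h2 h3).elim
  · rename_i x y heq; injection heq with e1 e2; rw [e2]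
  · rename_i heq; cases heq

theorem prefix2_false (c : Char) (rest : List Char)
    (h1 : ∀ tail, c = '*' → rest = '*' :: tail → False) :
    List.isPrefixOf ['*','*'] (c :: rest) = false := by
  rcases rest with _ | ⟨a, r⟩ <;> simp [List.isPrefixOf]
  intro hc ha
  exact h1 r hc.symm (by rw [← ha])

theorem go3_spec : ∀ (l : List Char), ∀ fuel (cur : List Char) (acc : List (List Char)),
    l.length < fuel →
    PySem.Chars.splitOn.go ['`', '`', '`'] fuel l cur acc =
      acc.reverse ++ (cur.reverse ++ hd3 l) :: tl3 l := by
  intro l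
  induction l using tl3.induct with
  | case1 rest ih =>
    intro fuel cur acc h
    match fuel, h with
    | fuel+1, h =>
    simp only [PySem.Chars.splitOn.go]
    rw [if_pos (by simp [List.isPrefixOf])]
    simp only [List.length_cons] at h
    simp only [List.length, List.drop]
    rw [ih fuel [] _ (by omega)]
    simp [hd3, tl3]
  | case2 c rest h1 ih =>
    intro fuel cur acc h
    match fuel, h with
    | fuel+1, h =>
    simp only [PySem.Chars.splitOn.go]
    rw [if_neg (by simp [prefix3_false c rest h1])]
    simp only [List.length_cons] at h
    rw [ih fuel (c :: cur) _ (by omega)]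
    rw [hd3_cons c rest h1, tl3_cons c rest h1]
    simp
  | case3 =>
    intro fuel cur acc h
    match fuel, h with
    | fuel+1, h =>
    simp [PySem.Chars.splitOn.go, hd3, tl3]

theorem go2_spec : ∀ (l : List Char), ∀ fuel (cur : List Char) (acc : List (List Char)),
    l.length < fuel →
    PySem.Chars.splitOn.go ['*', '*'] fuel l cur acc =
      acc.reverse ++ (cur.reverse ++ hd2 l) :: tl2 l := by
  intro l
  induction l using tl2.induct with
  | case1 rest ih =>
    intro fuel cur acc h
    match fuel, h with
    | fuel+1, h =>
    simp only [PySem.Chars.splitOn.go]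
    rw [if_pos (by simp [List.isPrefixOf])]
    simp only [List.length_cons] at h
    simp only [List.length, List.drop]
    rw [ih fuel [] _ (by omega)]
    simp [hd2, tl2]
  | case2 c rest h1 ih =>
    intro fuel cur acc h
    match fuel, h with
    | fuel+1, h =>
    simp only [PySem.Chars.splitOn.go]
    rw [if_neg (by simp [prefix2_false c rest h1])]
    simp only [List.length_cons] at h
    rw [ih fuel (c :: cur) _ (by omega)]
    rw [hd2_cons c rest h1, tl2_cons c rest h1]
    simp
  | case3 =>
    intro fuel cur acc h
    match fuel, h with
    | fuel+1, h =>
    simp [PySem.Chars.splitOn.go, hd2, tl2]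

theorem splitOn3_eq (cs : List Char) :
    PySem.Chars.splitOn cs ['`', '`', '`'] = hd3 cs :: tl3 cs := by
  simpa using go3_spec cs (cs.length + 1) [] [] (by omega)

theorem splitOn2_eq (cs : List Char) :
    PySem.Chars.splitOn cs ['*', '*'] = hd2 cs :: tl2 cs := by
  simpa using go2_spec cs (cs.length + 1) [] [] (by omega)

-- unfolding equations for innerScan
theorem innerScan_sep (b : Bool) (run rest : List Char) :
    innerScan b run ('*' :: '*' :: rest) =
      if b then PySem.Chars.strip run :: innerScan false [] rest
      else innerScan true [] rest := by
  rw [innerScan.eq_def]; rfl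

theorem innerScan_cons (b : Bool) (run : List Char) (c : Char) (rest : List Char)
    (h1 : ∀ tail, c = '*' → rest = '*' :: tail → False) :
    innerScan b run (c :: rest) = innerScan b (if b then run ++ [c] else run) rest := by
  rw [innerScan.eq_def]
  split
  · rename_i heq; injection heq with h2 h3; exact (h1 _ h2 h3).elim
  · rename_i x y heq; injection heq with e1 e2; rw [e1, e2]
  · rename_i heq; cases heq

theorem innerScan_nil (b : Bool) (run : List Char) :
    innerScan b run [] = if b then [PySem.Chars.strip run] else [] := by
  rw [innerScan.eq_def]

-- innerScan against the split pieces
theorem innerScan_eq : ∀ (t run : List Char),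
    (innerScan true run t = PySem.Chars.strip (run ++ hd2 t) :: pick false (tl2 t)) ∧
    (innerScan false run t = pick true (tl2 t)) := by
  intro t
  induction t using tl2.induct with
  | case1 rest ih =>
    intro run
    constructor
    · rw [innerScan_sep, if_pos rfl, (ih []).2]
      simp [hd2, tl2, pick]
    · rw [innerScan_sep, if_neg (by simp), (ih []).1]
      simp [tl2, pick]
  | case2 c rest h1 ih =>
    intro run
    constructor
    · rw [innerScan_cons true run c rest h1, if_pos rfl, (ih (run ++ [c])).1]
      rw [hd2_cons c rest h1, tl2_cons c rest h1]
      simp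
    · rw [innerScan_cons false run c rest h1, if_neg (by simp), (ih run).2]
      rw [tl2_cons c rest h1]
  | case3 =>
    intro run
    constructor
    · rw [innerScan_nil, if_pos rfl]; simp [hd2, tl2, pick]
    · rw [innerScan_nil, if_neg (by simp)]; simp [tl2, pick]

-- pyRange bookkeeping
theorem pyRange_two_nil0 : PySem.List.pyRange 0 ((0 : Nat) : Int) 2 = [] := by decide
theorem pyRange_two_one0 : PySem.List.pyRange 0 ((1 : Nat) : Int) 2 = [0] := by decide
theorem pyRange_two_nil1 : PySem.List.pyRange 1 ((0 : Nat) : Int) 2 = [] := by decide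
theorem pyRange_two_one1 : PySem.List.pyRange 1 ((1 : Nat) : Int) 2 = [] := by decide

theorem pyRange_two_step (a : Int) (n : Nat) (ha : a = 0 ∨ a = 1) :
    PySem.List.pyRange a ((n + 2 : Nat) : Int) 2 =
      a :: (PySem.List.pyRange a (n : Int) 2).map (· + 2) := by
  rw [PySem.List.pyRange_of_pos _ _ (by norm_num),
      PySem.List.pyRange_of_pos _ _ (by norm_num)]
  have h2 : (if a < ((n + 2 : Nat) : Int) then ((((n + 2 : Nat) : Int) - a + 2 - 1) / 2).toNat else 0)
      = (if a < ((n : Nat) : Int) then ((((n : Nat) : Int) - a + 2 - 1) / 2).toNat else 0) + 1 := by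
    rcases ha with rfl | rfl <;> (push_cast; split_ifs <;> omega)
  rw [h2, List.range_succ_eq_map]
  simp only [List.map_cons, List.map_map]
  congr 1
  · omega
  · apply List.map_congr_left
    intro k _
    simp [Function.comp]
    omega

theorem pyGetD_cons2 {α : Type} (x y : α) (l : List α) (d : α) (j : Int) (h : 0 ≤ j) :
    PySem.List.pyGetD (x :: y :: l) (j + 2) d = PySem.List.pyGetD l j d := by
  obtain ⟨m, rfl⟩ : ∃ m : Nat, j = (m : Int) := ⟨j.toNat, by omega⟩
  have : ((m : Int) + 2) = ((m + 2 : Nat) : Int) := by omega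
  rw [this, PySem.List.pyGetD_natCast, PySem.List.pyGetD_natCast]
  rfl

-- A's inner loop collects pick false
theorem innerFold_eq : ∀ (n : Nat) (l : List (List Char)), l.length ≤ n →
    ∀ (bb : List (List Char)),
    (PySem.List.pyRange 1 (l.length : Int) 2).foldl
        (fun bb j => bb ++ [PySem.Chars.strip (PySem.List.pyGetD l j [])]) bb
      = bb ++ pick false l := by
  intro n
  induction n using Nat.strong_induction_on with
  | _ n ih =>
    intro l hl bb
    match l with
    | [] => simp only [List.length_nil]; rw [pyRange_two_nil1]; simp [pick]
    | [a] => simp only [List.length_singleton]; rw [pyRange_two_one1]; simp [pick]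
    | a :: b :: r =>
      have hn : (a :: b :: r).length = r.length + 2 := by simp
      rw [hn, pyRange_two_step 1 r.length (Or.inr rfl)]
      simp only [List.foldl_cons, List.foldl_map]
      have hget1 : PySem.List.pyGetD (a :: b :: r) 1 [] = b := by
        have : (1 : Int) = ((1 : Nat) : Int) := by norm_num
        rw [this, PySem.List.pyGetD_natCast]; rfl
      rw [hget1]
      rw [PySem.List.foldl_congr_mem _ _
        (fun bb j => bb ++ [PySem.Chars.strip (PySem.List.pyGetD r j [])]) _ ?_]
      · match n, hl with
        | n+2, hl =>
          rw [ih n (by omega) r (by simpa using hl)]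
          simp [pick]
      · intro acc j hj
        have hj0 : 0 ≤ j := by
          have := (PySem.List.mem_pyRange_iff_of_pos (by norm_num) j).mp hj
          omega
        rw [pyGetD_cons2 a b r [] j hj0]

-- A's outer loop computes procT
theorem outerFold_eq : ∀ (n : Nat) (temp : List (List Char)), temp.length ≤ n →
    ∀ (s0 : List Char) (b0 : List (List Char)),
    (PySem.List.pyRange 0 (temp.length : Int) 2).foldl
        (fun (st : List Char × List (List Char)) i =>
          let t := PySem.List.pyGetD temp i []
          let ttemp := PySem.Chars.splitOn t ['*', '*']
          let bb :=
            (PySem.List.pyRange 1 (ttemp.length : Int) 2).foldl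
              (fun bb j => bb ++ [PySem.Chars.strip (PySem.List.pyGetD ttemp j [])]) st.2
          (st.1 ++ t ++ [' '], bb))
        (s0, b0)
      = (s0 ++ (procT temp).1, b0 ++ (procT temp).2) := by
  intro n
  induction n using Nat.strong_induction_on with
  | _ n ih =>
    intro temp htemp s0 b0
    match temp with
    | [] => simp only [List.length_nil]; rw [pyRange_two_nil0]; simp [procT]
    | [a] =>
      simp only [List.length_singleton]
      rw [pyRange_two_one0]
      simp only [List.foldl_cons, List.foldl_nil]
      have hget0 : PySem.List.pyGetD [a] 0 [] = a := by
        have : (0 : Int) = ((0 : Nat) : Int) := by norm_num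
        rw [this, PySem.List.pyGetD_natCast]; rfl
      simp only [hget0]
      rw [innerFold_eq (PySem.Chars.splitOn a ['*','*']).length _ le_rfl]
      rw [splitOn2_eq]
      simp [procT, pick]
    | a :: b :: r =>
      have hn : (a :: b :: r).length = r.length + 2 := by simp
      rw [hn, pyRange_two_step 0 r.length (Or.inl rfl)]
      simp only [List.foldl_cons, List.foldl_map]
      have hget0 : PySem.List.pyGetD (a :: b :: r) 0 [] = a := by
        have : (0 : Int) = ((0 : Nat) : Int) := by norm_num
        rw [this, PySem.List.pyGetD_natCast]; rfl
      simp only [hget0]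
      rw [innerFold_eq (PySem.Chars.splitOn a ['*','*']).length _ le_rfl]
      rw [splitOn2_eq]
      rw [PySem.List.foldl_congr_mem _ _
        (fun (st : List Char × List (List Char)) i =>
          let t := PySem.List.pyGetD r i []
          let ttemp := PySem.Chars.splitOn t ['*', '*']
          let bb :=
            (PySem.List.pyRange 1 (ttemp.length : Int) 2).foldl
              (fun bb j => bb ++ [PySem.Chars.strip (PySem.List.pyGetD ttemp j [])]) st.2
          (st.1 ++ t ++ [' '], bb)) _ ?_]
      · match n, htemp with
        | n+2, htemp =>
          rw [ih n (by omega) r (by simpa using htemp)]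
          rw [procT_cons]
          simp [pick]
      · intro acc j hj
        have hj0 : 0 ≤ j := by
          have := (PySem.List.mem_pyRange_iff_of_pos (by norm_num) j).mp hj
          omega
        simp only
        rw [pyGetD_cons2 a b r [] j hj0]

-- unfolding equations for scanB
theorem scanB_sep3 (inCode inBold : Bool) (seg run strin : List Char)
    (bb : List (List Char)) (rest : List Char) :
    scanB ('`' :: '`' :: '`' :: rest) inCode inBold seg run strin bb =
      if inCode then scanB rest false inBold seg run strin bb
      else scanB rest true false [] [] (strin ++ seg ++ [' '])
        (if inBold then bb ++ [PySem.Chars.strip run] else bb) := by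
  rw [scanB.eq_def]; rfl

theorem scanB_sep2 (inCode inBold : Bool) (seg run strin : List Char)
    (bb : List (List Char)) (rest : List Char) :
    scanB ('*' :: '*' :: rest) inCode inBold seg run strin bb =
      if inCode then scanB ('*' :: rest) true inBold seg run strin bb
      else
        if inBold then
          scanB rest false false (seg ++ ['*', '*']) [] strin (bb ++ [PySem.Chars.strip run])
        else scanB rest false true (seg ++ ['*', '*']) run strin bb := by
  rw [scanB.eq_def]; rfl

theorem scanB_nil (inCode inBold : Bool) (seg run strin : List Char) (bb : List (List Char)) :
    scanB [] inCode inBold seg run strin bb =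
      if inCode then (strin, bb)
      else (strin ++ seg ++ [' '], if inBold then bb ++ [PySem.Chars.strip run] else bb) := by
  rw [scanB.eq_def]

theorem scanB_cons (inCode inBold : Bool) (seg run strin : List Char) (bb : List (List Char))
    (c : Char) (rest : List Char)
    (h3 : ∀ tail, c = '`' → rest = '`' :: '`' :: tail → False)
    (h2 : ∀ tail, c = '*' → rest = '*' :: tail → False) :
    scanB (c :: rest) inCode inBold seg run strin bb =
      if inCode then scanB rest true inBold seg run strin bb
      else scanB rest false inBold (seg ++ [c]) (if inBold then run ++ [c] else run) strin bb := by
  rw [scanB.eq_def]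
  split
  · rename_i heq; injection heq with e1 e2; exact (h3 _ e1 e2).elim
  · rename_i heq; injection heq with e1 e2; exact (h2 _ e1 e2).elim
  · rename_i x y heq; injection heq with e1 e2; rw [e1, e2]
  · rename_i heq; cases heq

-- the main scan lemma: B's scan computes A's even-segment processing
-- (the scan keeps the invariant run = [] whenever the bold flag is off)
theorem scanB_eq : ∀ (n : Nat) (cs : List Char), cs.length ≤ n →
    (∀ (bold : Bool) (seg run strin : List Char) (bb : List (List Char)),
        (bold = true ∨ run = []) →
        scanB cs false bold seg run strin bb =
          (strin ++ seg ++ hd3 cs ++ [' '] ++ (procT (tl3 cs).tail).1,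
           bb ++ innerScan bold run (hd3 cs) ++ (procT (tl3 cs).tail).2)) ∧
    (∀ (strin : List Char) (bb : List (List Char)),
        scanB cs true false [] [] strin bb =
          (strin ++ (procT (tl3 cs)).1, bb ++ (procT (tl3 cs)).2)) := by
  intro n
  induction n using Nat.strong_induction_on with
  | _ n ih =>
    intro cs hcs
    match cs, hcs with
    | [], _ =>
      constructor
      · intro bold seg run strin bb _
        rw [scanB_nil, if_neg (by simp)]
        simp only [hd3, tl3, procT, innerScan_nil, List.tail_nil]
        cases bold <;> simp
      · intro strin bb
        rw [scanB_nil, if_pos rfl]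
        simp [tl3, procT]
    | c :: rest, hcs =>
      by_cases hsh3 : ∃ tail, c = '`' ∧ rest = '`' :: '`' :: tail
      · obtain ⟨tail, rfl, rfl⟩ := hsh3
        have hr : tail.length ≤ n - 3 := by simp at hcs; omega
        have hlt : n - 3 < n := by simp at hcs; omega
        constructor
        · intro bold seg run strin bb _
          rw [scanB_sep3, if_neg (by simp)]
          rw [(ih (n-3) hlt tail hr).2]
          simp only [hd3_bt, tl3_bt, List.tail_cons]
          rw [innerScan_nil]
          cases bold <;> simp
        · intro strin bb
          rw [scanB_sep3, if_pos rfl]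
          rw [(ih (n-3) hlt tail hr).1 false [] [] strin bb (Or.inr rfl)]
          rw [tl3_bt, procT_cons]
          rw [(innerScan_eq (hd3 tail) []).2]
          simp
      · by_cases hsh2 : ∃ tail, c = '*' ∧ rest = '*' :: tail
        · obtain ⟨tail, rfl, rfl⟩ := hsh2
          have hr : tail.length ≤ n - 2 := by simp at hcs; omega
          have hlt2 : n - 2 < n := by simp at hcs; omega
          have hr1 : ('*' :: tail).length ≤ n - 1 := by simp at hcs ⊢; omega
          have hlt1 : n - 1 < n := by simp at hcs; omega
          have hp3 : ∀ t, '*' = '`' → '*' :: tail = '`' :: '`' :: t → False := by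
            intro _ h _; cases h
          have hp3' : ∀ t, '*' = '`' → tail = '`' :: '`' :: t → False := by
            intro _ h _; cases h
          have hhd : hd3 ('*' :: '*' :: tail) = '*' :: '*' :: hd3 tail := by
            rw [hd3_cons _ _ hp3, hd3_cons _ _ hp3']
          have htl3 : tl3 ('*' :: tail) = tl3 tail := tl3_cons _ _ hp3'
          have htl : tl3 ('*' :: '*' :: tail) = tl3 tail := by
            rw [tl3_cons _ _ hp3, htl3]
          constructor
          · intro bold seg run strin bb hbr
            rw [scanB_sep2, if_neg (by simp)]
            rw [hhd, htl, innerScan_sep]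
            cases bold with
            | true =>
              rw [if_pos rfl, if_pos rfl]
              rw [(ih (n-2) hlt2 tail hr).1 false (seg ++ ['*','*']) [] strin
                (bb ++ [PySem.Chars.strip run]) (Or.inr rfl)]
              simp
            | false =>
              rcases hbr with h | rfl
              · cases h
              rw [if_neg (by simp), if_neg (by simp)]
              rw [(ih (n-2) hlt2 tail hr).1 true (seg ++ ['*','*']) [] strin bb (Or.inl rfl)]
              simp
          · intro strin bb
            rw [scanB_sep2, if_pos rfl]
            rw [(ih (n-1) hlt1 ('*' :: tail) hr1).2 strin bb]
            rw [htl, htl3]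
        · have h3 : ∀ tail, c = '`' → rest = '`' :: '`' :: tail → False := by
            intro tail e1 e2; exact hsh3 ⟨tail, e1, e2⟩
          have h2 : ∀ tail, c = '*' → rest = '*' :: tail → False := by
            intro tail e1 e2; exact hsh2 ⟨tail, e1, e2⟩
          have h2' : ∀ t, c = '*' → hd3 rest = '*' :: t → False := by
            intro t e1 e2
            obtain ⟨u, hu⟩ := hd3_cons_inv rest '*' t e2
            exact h2 u e1 hu
          have hr : rest.length ≤ n - 1 := by simp at hcs; omega
          have hlt : n - 1 < n := by simp at hcs; omega
          have hhd : hd3 (c :: rest) = c :: hd3 rest := hd3_cons _ _ h3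
          have htl : tl3 (c :: rest) = tl3 rest := tl3_cons _ _ h3
          constructor
          · intro bold seg run strin bb hbr
            rw [scanB_cons _ _ _ _ _ _ _ _ h3 h2, if_neg (by simp)]
            rw [(ih (n-1) hlt rest hr).1 bold (seg ++ [c]) (if bold then run ++ [c] else run)
              strin bb (by cases bold <;> (simp at hbr ⊢; try exact hbr))]
            rw [hhd, htl, innerScan_cons _ _ _ _ h2']
            simp
          · intro strin bb
            rw [scanB_cons _ _ _ _ _ _ _ _ h3 h2, if_pos rfl]
            rw [(ih (n-1) hlt rest hr).2 strin bb]
            rw [htl]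

-- ===== VERDICT (by name: the statement is the Claim_ definition above) =====
theorem dajBB_spec : Claim_equal_dajBB := by
  intro msg _
  unfold Spec_dajBB dajBB dajBB_alt
  simp only [splitOn3_eq]
  rw [outerFold_eq (hd3 msg.toList :: tl3 msg.toList).length _ le_rfl]
  rw [(scanB_eq msg.toList.length msg.toList le_rfl).1 false [] [] [] [] (Or.inr rfl)]
  rw [procT_cons]
  rw [(innerScan_eq (hd3 msg.toList) []).2]
  simp
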